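-- pv_equiv track=rewrite | github.com/everalert/yojijukugo | scraper.py | map_array
-- ===== SOURCE A (Python) =====
-- def map_array(data, mapping): # data 2d (header, item); mapping 1d (header)
-- 	output = ['' for i in range(len(mapping))]
-- 	head_index = []
-- 	size_index = []
-- 	step_head = ''
-- 	step_index = 0
-- 	for i, item in enumerate(data):
-- 		step_head = item[0]
-- 		if head_index.count(step_head) <= 0:
-- 			head_index.append(step_head)
-- 			size_index.append(0)
-- 		step_index = head_index.index(step_head)
-- 		size_index[step_index] += 1
-- 		next_mapping = get_array_mapping(head_index[step_index],size_index[step_index],mapping)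
-- 		if next_mapping >= 0:
-- 			next_item = item[1].encode("utf8")
-- 			output[next_mapping] = next_item.decode('utf8')
-- 	return output
--
-- def get_array_mapping(header, nth, mapping_array):
-- 	head_size = 0
-- 	for i, item in enumerate(mapping_array):
-- 		if item == header:
-- 			head_size += 1
-- 		if head_size == nth:
-- 			return i
-- 	return -1
-- ===== SOURCE B (Python) =====
-- def map_array(data, mapping): # data 2d (header, item); mapping 1d (header)
-- 	occ = {}
-- 	for i, h in enumerate(mapping):
-- 		occ.setdefault(h, []).append(i)
-- 	output = [''] * len(mapping)
-- 	cnt = {}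
-- 	for h, v in data:
-- 		k = cnt.get(h, 0)
-- 		cnt[h] = k + 1
-- 		slots = occ.get(h, [])
-- 		if k < len(slots):
-- 			output[slots[k]] = v
-- 	return output
-- ===== Notes on version B (the rewrite author's own statement) =====
-- stated objective: faster
-- what changed: Instead of maintaining parallel head_index/size_index lists with count/index scans and rescanning mapping for every item's nth-occurrence slot, B precomputes a dict mapping each header to its list of mapping indices and keeps a per-header counter dict, so each data item is placed with O(1) lookups.
import Mathlib
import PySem

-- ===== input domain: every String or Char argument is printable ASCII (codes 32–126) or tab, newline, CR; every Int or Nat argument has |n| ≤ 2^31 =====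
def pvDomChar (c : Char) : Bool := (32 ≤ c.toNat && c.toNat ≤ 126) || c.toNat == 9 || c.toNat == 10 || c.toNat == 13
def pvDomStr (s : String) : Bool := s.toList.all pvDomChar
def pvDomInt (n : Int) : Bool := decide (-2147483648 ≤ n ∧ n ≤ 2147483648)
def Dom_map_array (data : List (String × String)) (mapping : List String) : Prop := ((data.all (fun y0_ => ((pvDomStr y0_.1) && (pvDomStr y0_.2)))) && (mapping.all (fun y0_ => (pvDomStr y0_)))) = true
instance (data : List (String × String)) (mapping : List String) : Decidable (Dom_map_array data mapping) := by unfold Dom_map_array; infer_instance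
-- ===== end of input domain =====

-- B replaces A's per-item linear scans (head_index.count/.index and a rescan of mapping
-- for each nth-occurrence lookup) by a precomputed header->slot-indices dict plus
-- per-header counters; objective: faster.


-- ===== PORT A =====
-- helper of A: the for-loop of get_array_mapping, carrying the enumerate index i and head_size
def gamGo (header : String) (nth : Int) : List String → Int → Int → Int
  | [], _, _ => -1
  | m :: ms, i, hs =>
    let hs' := if m == header then hs + 1 else hs
    if hs' == nth then i else gamGo header nth ms (i + 1) hs'

def get_array_mapping (header : String) (nth : Int) (mapping_array : List String) : Int :=
  gamGo header nth mapping_array 0 0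

-- A's for-loop over data, carrying (output, head_index, size_index).
-- head_index.index(step_head) is ported as List.idxOf: at this point step_head is
-- guaranteed present (the preceding branch appended it), so Python's .index cannot raise;
-- likewise size_index[step_index] is in range, so plain set/getD are exact here.
def mapLoopA (mapping : List String) : List (String × String) → List String → List String → List Int → List String
  | [], output, _, _ => output
  | item :: rest, output, head_index, size_index =>
    let sh := item.1
    let p := if head_index.count sh ≤ 0 then (head_index ++ [sh], size_index ++ [(0 : Int)]) else (head_index, size_index)
    let j := p.1.idxOf sh
    let n := p.2.getD j 0 + 1
    let size_index' := p.2.set j n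
    let nm := get_array_mapping sh n mapping
    let output' := if nm ≥ 0 then PySem.List.pySetD output nm item.2 else output
    mapLoopA mapping rest output' p.1 size_index'

def map_array (data : List (String × String)) (mapping : List String) : List String :=
  mapLoopA mapping data ((PySem.List.pyRange 0 (PySem.List.len mapping) 1).map (fun _ => "")) [] []

-- ===== PORT B =====
-- B's first loop: occ = {}; for i, h in enumerate(mapping): occ.setdefault(h, []).append(i)
def occDict (mapping : List String) : PySem.Dict String (List Int) :=
  (PySem.List.enumerate mapping 0).foldl (fun d p => d.modify p.2 [] (· ++ [p.1])) PySem.Dict.empty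

-- B's second loop over data, carrying (output, cnt)
def mapLoopB (occ : PySem.Dict String (List Int)) : List (String × String) → List String → PySem.Dict String Int → List String
  | [], output, _ => output
  | (h, v) :: rest, output, cnt =>
    let k := cnt.getD h 0
    let cnt' := cnt.insert h (k + 1)
    let slots := occ.getD h []
    let output' := if k < PySem.List.len slots then PySem.List.pySetD output (PySem.List.pyGetD slots k 0) v else output
    mapLoopB occ rest output' cnt'

def map_array_alt (data : List (String × String)) (mapping : List String) : List String :=
  mapLoopB (occDict mapping) data (PySem.List.pyRepeat [""] (PySem.List.len mapping)) PySem.Dict.empty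

-- ===== PRECONDITION & SPEC =====
def Spec_map_array (data : List (String × String)) (mapping : List String) (out : List String) : Prop := out = map_array_alt data mapping
instance (data : List (String × String)) (mapping : List String) (out : List String) : Decidable (Spec_map_array data mapping out) := by unfold Spec_map_array; infer_instance

-- ===== CLAIM (what is proved, stated in full; the proofs are below) =====
def Claim_equal_map_array : Prop := ∀ (data : List (String × String)) (mapping : List String), Dom_map_array data mapping → Spec_map_array data mapping (map_array data mapping)

-- ===== LEMMAS AND PROOFS =====

-- the list of positions of header h in mapping (what occDict stores per key)
def occList (h : String) (mapping : List String) : List Int :=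
  (((PySem.List.enumerate mapping 0).filter (fun p => p.2 == h)).map (·.1))

theorem occDict_getD (mapping : List String) (h : String) :
    (occDict mapping).getD h [] = occList h mapping := by
  unfold occDict occList
  rw [show (PySem.List.enumerate mapping 0).foldl (fun d p => d.modify p.2 [] (· ++ [p.1])) PySem.Dict.empty
      = ((PySem.List.enumerate mapping 0).map (fun p => (p.2, p.1))).foldl (fun d p => d.modify p.1 [] (· ++ [p.2])) PySem.Dict.empty
      from by rw [List.foldl_map]]
  rw [PySem.Dict.getD_foldl_modify_append]
  simp [List.filter_map, List.map_map, Function.comp_def]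

theorem occList_nonneg (h : String) (mapping : List String) :
    ∀ x ∈ occList h mapping, 0 ≤ x := by
  intro x hx
  unfold occList at hx
  simp only [List.mem_map, List.mem_filter] at hx
  obtain ⟨p, ⟨hp, _⟩, rfl⟩ := hx
  rw [PySem.List.mem_enumerate_iff] at hp
  obtain ⟨k, hk, rfl⟩ := hp
  simp

-- A's inner scan gamGo, characterised: with target count hs + k + 1 it returns the
-- (k+1)-st remaining occurrence position of h, or -1 when there are at most k left
theorem gamGo_spec (h : String) (ms : List String) : ∀ (i hs : Int) (k : Nat),
    gamGo h (hs + (k : Int) + 1) ms i hs =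
      ((((PySem.List.enumerate ms i).filter (fun p => p.2 == h)).map (·.1))[k]?).getD (-1) := by
  induction ms with
  | nil => intro i hs k; simp [gamGo, PySem.List.enumerate]
  | cons m ms ih =>
    intro i hs k
    rw [PySem.List.enumerate_cons]
    by_cases hm : m = h
    · subst hm
      cases k with
      | zero =>
        simp [gamGo]
      | succ k' =>
        have hne : ¬ (hs + 1 == hs + ((k' : Int) + 1) + 1) = true := by simp; omega
        simp only [gamGo, beq_self_eq_true, if_true, List.filter_cons_of_pos, List.map_cons]
        push_cast
        rw [if_neg (by simpa using hne)]
        have := ih (i + 1) (hs + 1) k'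
        rw [show hs + ((k' : Int) + 1) + 1 = (hs + 1) + (k' : Int) + 1 by ring] at *
        simp only [List.getElem?_cons_succ]
        exact this
    · have hb : (m == h) = false := by simp [hm]
      have hfil : List.filter (fun p => p.2 == h) ((i, m) :: PySem.List.enumerate ms (i + 1))
          = List.filter (fun p => p.2 == h) (PySem.List.enumerate ms (i + 1)) := by
        rw [List.filter_cons_of_neg]; simp [hm]
      have hcond : (hs == hs + (k : Int) + 1) = false := by simp; omega
      simp only [gamGo, hb, Bool.false_eq_true, if_false, hcond, hfil]
      exact ih (i + 1) hs k

theorem gam_spec (h : String) (mapping : List String) (k : Nat) :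
    get_array_mapping h ((k : Int) + 1) mapping = ((occList h mapping)[k]?).getD (-1) := by
  unfold get_array_mapping occList
  have := gamGo_spec h mapping 0 0 k
  rw [show (0 : Int) + (k : Int) + 1 = (k : Int) + 1 by ring] at this
  exact this

-- A's lookup of the running count of header h in its parallel lists
def lookA (hi : List String) (si : List Int) (h : String) : Int := si.getD (hi.idxOf h) 0

-- the A-step and the B-step write the same output cell (or both skip)
theorem out_step_eq (mapping : List String) (h v : String) (out : List String) (κ : Nat) :
    (if get_array_mapping h ((κ : Int) + 1) mapping ≥ 0 then
        PySem.List.pySetD out (get_array_mapping h ((κ : Int) + 1) mapping) v else out)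
      = (if (κ : Int) < PySem.List.len ((occDict mapping).getD h []) then
          PySem.List.pySetD out (PySem.List.pyGetD ((occDict mapping).getD h []) (κ : Int) 0) v else out) := by
  rw [gam_spec, occDict_getD, PySem.List.len_eq, PySem.List.pyGetD_natCast]
  by_cases hκ : κ < (occList h mapping).length
  · have hsome : (occList h mapping)[κ]? = some ((occList h mapping)[κ]'hκ) := List.getElem?_eq_getElem hκ
    rw [hsome]
    have hnn : 0 ≤ (occList h mapping)[κ]'hκ := occList_nonneg h mapping _ (List.getElem_mem hκ)
    rw [if_pos (by simpa using hnn), if_pos (by exact_mod_cast hκ)]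
    rw [List.getD_eq_getElem?_getD, hsome]
    rfl
  · have hnone : (occList h mapping)[κ]? = none := List.getElem?_eq_none (by omega)
    rw [hnone]
    rw [if_neg (by norm_num), if_neg (by omega)]

-- main invariant proof: A's (head_index, size_index) pair and B's cnt dict hold the
-- same running counts, so the two loops write the same cells in the same order
theorem loop_eq (mapping : List String) :
    ∀ (data : List (String × String)) (out : List String) (hi : List String) (si : List Int)
      (cnt : PySem.Dict String Int),
      si.length = hi.length →
      (∀ h, lookA hi si h = cnt.getD h 0) →
      (∀ h, 0 ≤ cnt.getD h 0) →
      mapLoopA mapping data out hi si = mapLoopB (occDict mapping) data out cnt := by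
  intro data
  induction data with
  | nil => intro out hi si cnt _ _ _; rfl
  | cons item rest ih =>
    obtain ⟨h, v⟩ := item
    intro out hi si cnt hlen hinv hnn
    set κ : Nat := (cnt.getD h 0).toNat with hκdef
    have hκ : cnt.getD h 0 = (κ : Int) := (Int.toNat_of_nonneg (hnn h)).symm
    by_cases hmem : h ∈ hi
    · -- header already seen
      have hcount : ¬ (hi.count h ≤ 0) := by
        have := List.count_pos_iff.mpr hmem; omega
      have hj : hi.idxOf h < hi.length := List.idxOf_lt_length_of_mem hmem
      have hjs : hi.idxOf h < si.length := by omega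
      have hn : si.getD (hi.idxOf h) 0 + 1 = (κ : Int) + 1 := by
        have := hinv h; rw [hκ] at this; rw [← this]; rfl
      simp only [mapLoopA, mapLoopB, if_neg hcount]
      rw [hn, hκ, out_step_eq mapping h v out κ]
      apply ih
      · simp [hlen]
      · intro h'
        by_cases hh : h' = h
        · subst hh
          unfold lookA
          rw [List.getD_eq_getElem?_getD, List.getElem?_set_self hjs,
            PySem.Dict.getD_insert_self]
          rfl
        · rw [PySem.Dict.getD_insert_of_ne _ _ _ hh, ← hinv h']
          unfold lookA
          have hne : hi.idxOf h' ≠ hi.idxOf h := by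
            intro heq
            by_cases hm' : h' ∈ hi
            · have e1 : hi[List.idxOf h' hi]? = some h' := by
                rw [List.getElem?_eq_getElem (List.idxOf_lt_length_of_mem hm'),
                  List.getElem_idxOf (List.idxOf_lt_length_of_mem hm')]
              have e2 : hi[List.idxOf h hi]? = some h := by
                rw [List.getElem?_eq_getElem hj, List.getElem_idxOf hj]
              rw [heq, e2] at e1
              exact hh (by simpa using e1.symm)
            · have : hi.idxOf h' = hi.length := List.idxOf_eq_length hm'
              omega
          rw [List.getD_eq_getElem?_getD, List.getElem?_set_ne (by omega),
            ← List.getD_eq_getElem?_getD]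
      · intro h'
        by_cases hh : h' = h
        · subst hh; rw [PySem.Dict.getD_insert_self]; omega
        · rw [PySem.Dict.getD_insert_of_ne _ _ _ hh]; exact hnn h'
    · -- new header: A appends to head_index/size_index, B's counter starts at 0
      have hcount : hi.count h ≤ 0 := by
        simp [List.count_eq_zero_of_not_mem hmem]
      have hidx : (hi ++ [h]).idxOf h = hi.length := by
        simp [List.idxOf_append, hmem]
      have hk0 : cnt.getD h 0 = 0 := by
        rw [← hinv h]
        unfold lookA
        rw [List.idxOf_eq_length hmem, List.getD_eq_default _ _ (by omega)]
      have hκ0 : κ = 0 := by simp [hκdef, hk0]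
      have hn : ((si ++ [(0:Int)]).getD ((hi ++ [h]).idxOf h) 0) + 1 = (κ : Int) + 1 := by
        rw [hidx, hκ0, List.getD_eq_getElem?_getD, List.getElem?_append_right (by omega)]
        simp [hlen]
      simp only [mapLoopA, mapLoopB, if_pos hcount]
      rw [hn, hκ, out_step_eq mapping h v out κ]
      apply ih
      · simp [hlen]
      · intro h'
        by_cases hh : h' = h
        · subst hh
          unfold lookA
          rw [hidx, List.getD_eq_getElem?_getD,
            List.getElem?_set_self (by simp [hlen]), PySem.Dict.getD_insert_self]
          rfl
        · rw [PySem.Dict.getD_insert_of_ne _ _ _ hh, ← hinv h']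
          unfold lookA
          by_cases hm' : h' ∈ hi
          · have hlt : hi.idxOf h' < hi.length := List.idxOf_lt_length_of_mem hm'
            rw [List.idxOf_append_of_mem hm', List.getD_eq_getElem?_getD,
              List.getElem?_set_ne (by omega), List.getElem?_append_left (by omega),
              ← List.getD_eq_getElem?_getD]
          · have h1 : hi.idxOf h' = hi.length := List.idxOf_eq_length hm'
            have h2 : (hi ++ [h]).idxOf h' = (hi ++ [h]).length := by
              apply List.idxOf_eq_length
              simp [hm', hh]
            rw [h1, h2, List.getD_eq_default _ _ (by simp [hlen]),
              List.getD_eq_default _ _ (by omega)]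
      · intro h'
        by_cases hh : h' = h
        · subst hh; rw [PySem.Dict.getD_insert_self]; omega
        · rw [PySem.Dict.getD_insert_of_ne _ _ _ hh]; exact hnn h'

theorem init_eq (mapping : List String) :
    ((PySem.List.pyRange 0 (PySem.List.len mapping) 1).map (fun _ => "")) =
      PySem.List.pyRepeat [""] (PySem.List.len mapping) := by
  rw [PySem.List.pyRepeat_singleton]
  simp only [PySem.List.len]
  rw [PySem.List.pyRange_zero_natCast]
  simp [Function.comp_def, List.map_const']

-- ===== VERDICT (by name: the statement is the Claim_ definition above) =====
theorem map_array_spec : Claim_equal_map_array := by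
  intro data mapping _
  show map_array data mapping = map_array_alt data mapping
  unfold map_array map_array_alt
  rw [init_eq]
  exact loop_eq mapping data _ [] [] PySem.Dict.empty rfl (fun h => by simp [lookA])
    (fun h => by simp)
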